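-- pv_equiv track=rewrite | github.com/pde-bakk/AdventOfCode | 2024/day02/day02.py | solve
-- ===== SOURCE A (Python) =====
-- def issafe(line: list[int]) -> bool:
-- 	alldec = True
-- 	allinc = True
-- 	for a, b in zip(line, line[1:]):
-- 		if abs(a - b) < 1 or abs(a - b) > 3:
-- 			alldec = False
-- 			allinc = False
-- 		if a <= b:
-- 			alldec = False
-- 		if b <= a:
-- 			allinc = False
-- 	return alldec or allinc
--
-- def solve(lines: list[list[int]], part: int) -> int:
-- 	cunt = 0
-- 	for line in lines:
-- 		if issafe(line):
-- 			cunt += 1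
-- 		elif part == 2:
-- 			for i, _ in enumerate(line):
-- 				l = line.copy()
-- 				l.pop(i)
-- 				if issafe(l):
-- 					cunt += 1
-- 					break
--
-- 	return cunt
-- ===== SOURCE B (Python) =====
-- def _safe_dir(line, sign):
--     return all(1 <= sign * (b - a) <= 3 for a, b in zip(line, line[1:]))
--
-- def _first_bad(line, sign):
--     i = 0
--     for a, b in zip(line, line[1:]):
--         if not (1 <= sign * (b - a) <= 3):
--             return i
--         i += 1
--     return None
--
-- def _dampened(line, sign):
--     i = _first_bad(line, sign)
--     if i is None:
--         return True
--     return (_safe_dir(line[:i] + line[i + 1:], sign)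
--             or _safe_dir(line[:i + 1] + line[i + 2:], sign))
--
-- def solve(lines: list, part: int) -> int:
--     count = 0
--     for line in lines:
--         if _safe_dir(line, 1) or _safe_dir(line, -1):
--             count += 1
--         elif part == 2 and (_dampened(line, 1) or _dampened(line, -1)):
--             count += 1
--     return count
-- ===== Notes on version B (the rewrite author's own statement) =====
-- stated objective: faster
-- what changed: Part-2 dampener no longer retries issafe on all n removed-element copies: B locates one violating adjacent pair per direction and tests only the two removal candidates at that pair, each direction checked with a single linear all() over differences.
import Mathlib
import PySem

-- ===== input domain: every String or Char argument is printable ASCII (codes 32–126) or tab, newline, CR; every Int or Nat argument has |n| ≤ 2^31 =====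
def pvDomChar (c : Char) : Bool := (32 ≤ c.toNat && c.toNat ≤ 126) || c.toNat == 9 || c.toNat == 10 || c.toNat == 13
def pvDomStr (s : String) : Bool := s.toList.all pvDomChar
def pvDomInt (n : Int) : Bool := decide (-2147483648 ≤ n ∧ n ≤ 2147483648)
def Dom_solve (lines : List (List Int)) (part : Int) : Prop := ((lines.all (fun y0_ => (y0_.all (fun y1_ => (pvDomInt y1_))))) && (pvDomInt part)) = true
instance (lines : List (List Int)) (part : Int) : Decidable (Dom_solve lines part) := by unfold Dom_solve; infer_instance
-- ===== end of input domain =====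

-- B replaces A's quadratic part-2 dampener (retry issafe on every single-element removal)
-- by locating one violating adjacent pair per monotone direction and testing only the two
-- removal candidates at that pair; objective: faster (asymptotic, O(n^2) -> O(n) per line).

-- ===== PORT A =====
-- 'for a, b in zip(line, line[1:])' : line[1:] is line.drop 1; the loop is a foldl over the zip
def issafeStep (st : Bool × Bool) (ab : Int × Int) : Bool × Bool :=
  let a := ab.1
  let b := ab.2
  let st1 := if |a - b| < 1 ∨ |a - b| > 3 then (false, false) else st
  let st2 := if a ≤ b then (false, st1.2) else st1
  if b ≤ a then (st2.1, false) else st2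

def issafe (line : List Int) : Bool :=
  let st := (line.zip (line.drop 1)).foldl issafeStep (true, true)
  st.1 || st.2

-- 'for i, _ in enumerate(line): l = line.copy(); l.pop(i); if issafe(l): cunt += 1; break'
-- pop at a valid index i is List.eraseIdx i; the break makes the loop an early-exit scan
def solveInner (line : List Int) : List Nat → Bool
  | [] => false
  | i :: rest => if issafe (line.eraseIdx i) then true else solveInner line rest

def solve (lines : List (List Int)) (part : Int) : Int :=
  lines.foldl (fun cunt line =>
    if issafe line then cunt + 1
    else if part = 2 then
      (if solveInner line (List.range line.length) then cunt + 1 else cunt)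
    else cunt) 0

-- ===== PORT B =====
def goodStep (sign a b : Int) : Bool := decide (1 ≤ sign * (b - a) ∧ sign * (b - a) ≤ 3)

def safeDir (line : List Int) (sign : Int) : Bool :=
  (line.zip (line.drop 1)).all (fun ab => goodStep sign ab.1 ab.2)

def firstBadAux (sign : Int) : List (Int × Int) → Nat → Option Nat
  | [], _ => none
  | ab :: rest, i => if goodStep sign ab.1 ab.2 then firstBadAux sign rest (i + 1) else some i

-- line[:i] + line[i+1:] is take i ++ drop (i+1)
def dampened (line : List Int) (sign : Int) : Bool :=
  match firstBadAux sign (line.zip (line.drop 1)) 0 with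
  | none => true
  | some i =>
      safeDir (line.take i ++ line.drop (i + 1)) sign ||
      safeDir (line.take (i + 1) ++ line.drop (i + 2)) sign

def solve_alt (lines : List (List Int)) (part : Int) : Int :=
  lines.foldl (fun count line =>
    if safeDir line 1 || safeDir line (-1) then count + 1
    else if part = 2 ∧ (dampened line 1 || dampened line (-1)) then count + 1
    else count) 0

-- ===== PRECONDITION & SPEC =====
def Spec_solve (lines : List (List Int)) (part : Int) (out : Int) : Prop := out = solve_alt lines part
instance (lines : List (List Int)) (part : Int) (out : Int) : Decidable (Spec_solve lines part out) := by unfold Spec_solve; infer_instance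

-- ===== CLAIM (what is proved, stated in full; the proofs are below) =====
def Claim_equal_solve : Prop := ∀ (lines : List (List Int)) (part : Int), Dom_solve lines part → Spec_solve lines part (solve lines part)

-- ===== LEMMAS AND PROOFS =====

theorem issafeStep_eq (d i : Bool) (a b : Int) :
    issafeStep (d, i) (a, b) = (d && goodStep (-1) a b, i && goodStep 1 a b) := by
  simp only [issafeStep, goodStep, Int.abs_eq_natAbs]
  cases d <;> cases i <;> split_ifs <;>
    simp [Prod.ext_iff, decide_eq_true_eq, decide_eq_false_iff_not] <;> omega

theorem foldl_issafeStep (ps : List (Int × Int)) : ∀ (d i : Bool),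
    ps.foldl issafeStep (d, i) =
      (d && ps.all (fun ab => goodStep (-1) ab.1 ab.2),
       i && ps.all (fun ab => goodStep 1 ab.1 ab.2)) := by
  induction ps with
  | nil => simp
  | cons ab rest ih =>
      intro d i
      obtain ⟨a, b⟩ := ab
      simp only [List.foldl_cons, issafeStep_eq, List.all_cons, ih, Bool.and_assoc]

theorem issafe_eq (line : List Int) :
    issafe line = (safeDir line 1 || safeDir line (-1)) := by
  simp only [issafe, safeDir, foldl_issafeStep]
  exact Bool.or_comm _ _

theorem safeDir_eq_true_iff (l : List Int) (s : Int) :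
    safeDir l s = true ↔ ∀ k, (hk : k + 1 < l.length) → goodStep s l[k] l[k+1] = true := by
  unfold safeDir
  rw [List.all_eq_true]
  constructor
  · intro h k hk
    have hk' : k < (l.zip (l.drop 1)).length := by
      simp only [List.length_zip, List.length_drop]; omega
    have hm := h (l.zip (l.drop 1))[k] (List.getElem_mem hk')
    have h1 : 1 + k < l.length := by omega
    simpa [List.getElem_zip, List.getElem_drop, Nat.add_comm 1 k] using hm
  · intro h ab hab
    obtain ⟨k, hk, rfl⟩ := List.mem_iff_getElem.1 hab
    have hk2 : k + 1 < l.length := by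
      simp only [List.length_zip, List.length_drop] at hk; omega
    simpa [List.getElem_zip, List.getElem_drop, Nat.add_comm 1 k] using h k hk2

theorem firstBadAux_none (s : Int) : ∀ (ps : List (Int × Int)) (n : Nat),
    firstBadAux s ps n = none → ps.all (fun ab => goodStep s ab.1 ab.2) = true := by
  intro ps
  induction ps with
  | nil => simp
  | cons ab rest ih =>
      intro n h
      simp only [firstBadAux] at h
      by_cases hg : goodStep s ab.1 ab.2 = true
      · simp only [hg] at h
        simp [hg, ih _ h]
      · simp [hg] at h
      
theorem firstBadAux_some (s : Int) : ∀ (ps : List (Int × Int)) (n i : Nat),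
    firstBadAux s ps n = some i →
      n ≤ i ∧ ∃ hk : i - n < ps.length, goodStep s ps[i-n].1 ps[i-n].2 = false := by
  intro ps
  induction ps with
  | nil => intro n i h; simp [firstBadAux] at h
  | cons ab rest ih =>
      intro n i h
      simp only [firstBadAux] at h
      by_cases hg : goodStep s ab.1 ab.2 = true
      · simp only [hg] at h
        obtain ⟨hni, hk, hbad⟩ := ih (n + 1) i h
        refine ⟨by omega, by simp only [List.length_cons]; omega, ?_⟩
        have he : i - n = (i - (n + 1)) + 1 := by omega
        simpa [he] using hbad
      · simp only [hg] at h
        obtain rfl : n = i := by simpa using h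
        exact ⟨le_refl _, by simp, by simpa using hg⟩

theorem bad_survives (l : List Int) (s : Int) (i j : Nat) (hi : i + 1 < l.length)
    (hbad : goodStep s l[i] l[i+1] = false) (hj : j < l.length) (hji : j ≠ i) (hji1 : j ≠ i + 1) :
    ¬ safeDir (l.eraseIdx j) s = true := by
  intro hsd
  rw [safeDir_eq_true_iff] at hsd
  have hlen : (l.eraseIdx j).length = l.length - 1 := by
    simp [List.length_eraseIdx, hj]
  by_cases hlt : j < i
  · have hk : (i - 1) + 1 < (l.eraseIdx j).length := by omega
    have := hsd (i - 1) hk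
    rw [List.getElem_eraseIdx, List.getElem_eraseIdx] at this
    rw [dif_neg (by omega), dif_neg (by omega)] at this
    have e1 : i - 1 + 1 = i := by omega
    have e2 : i - 1 + 1 + 1 = i + 1 := by omega
    simp only [e1] at this
    rw [this] at hbad; simp at hbad
  · have hgt : i + 1 < j := by omega
    have hk : i + 1 < (l.eraseIdx j).length := by omega
    have := hsd i hk
    rw [List.getElem_eraseIdx, List.getElem_eraseIdx] at this
    rw [dif_pos (by omega), dif_pos (by omega)] at this
    rw [this] at hbad; simp at hbad

theorem damp_iff (l : List Int) (s : Int) (hs : safeDir l s = false) :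
    (dampened l s = true ↔ ∃ j, j < l.length ∧ safeDir (l.eraseIdx j) s = true) := by
  unfold dampened
  cases h : firstBadAux s (l.zip (l.drop 1)) 0 with
  | none =>
      have hall := firstBadAux_none s _ _ h
      rw [safeDir, hall] at hs
      simp at hs
  | some i =>
      obtain ⟨-, hk, hbad⟩ := firstBadAux_some s _ 0 i h
      simp only [Nat.sub_zero] at hk hbad
      have hi : i + 1 < l.length := by
        have := hk
        simp only [List.length_zip, List.length_drop] at this; omega
    
      have hbad' : goodStep s l[i] l[i+1] = false := by
        have h1 : 1 + i < l.length := by omega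
        simpa [List.getElem_zip, List.getElem_drop, Nat.add_comm 1 i] using hbad
      show (safeDir (List.take i l ++ List.drop (i + 1) l) s ||
              safeDir (List.take (i + 1) l ++ List.drop (i + 2) l) s) = true ↔ _
      rw [← List.eraseIdx_eq_take_drop_succ, ← List.eraseIdx_eq_take_drop_succ]
      constructor
      · intro hd
        rcases Bool.or_eq_true_iff.mp hd with h1 | h1
        · exact ⟨i, by omega, h1⟩
        · exact ⟨i + 1, hi, h1⟩
      · rintro ⟨j, hjl, hsafe⟩
        by_cases hji : j = i
        · subst hji; simp [hsafe]
        · by_cases hji1 : j = i + 1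
          · subst hji1; simp [hsafe]
          · exact absurd hsafe (bad_survives l s i j hi hbad' hjl hji hji1)

theorem solveInner_iff (line : List Int) : ∀ ks : List Nat,
    (solveInner line ks = true ↔ ∃ i ∈ ks, issafe (line.eraseIdx i) = true) := by
  intro ks
  induction ks with
  | nil => simp [solveInner]
  | cons k rest ih =>
      simp only [solveInner]
      by_cases hk : issafe (line.eraseIdx k) = true
      · simp [hk]
      · simp [hk, ih]

theorem step_eq (part : Int) :
    (fun (cunt : Int) (line : List Int) =>
      if issafe line then cunt + 1
      else if part = 2 then
        (if solveInner line (List.range line.length) then cunt + 1 else cunt)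
      else cunt)
    = (fun (count : Int) (line : List Int) =>
      if safeDir line 1 || safeDir line (-1) then count + 1
      else if part = 2 ∧ (dampened line 1 || dampened line (-1)) then count + 1
      else count) := by
  funext c line
  rw [issafe_eq]
  by_cases hs : (safeDir line 1 || safeDir line (-1)) = true
  · simp [hs]
  · have h1 : safeDir line 1 = false := by cases h : safeDir line 1 <;> simp_all
    have h2 : safeDir line (-1) = false := by cases h : safeDir line (-1) <;> simp_all
    by_cases hp : part = 2
    · subst hp
      have hbool : solveInner line (List.range line.length)
          = (dampened line 1 || dampened line (-1)) := by
        have hiff : solveInner line (List.range line.length) = true ↔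
            (dampened line 1 || dampened line (-1)) = true := by
          rw [solveInner_iff, Bool.or_eq_true_iff, damp_iff line 1 h1, damp_iff line (-1) h2]
          constructor
          · rintro ⟨i, hi, hsafe⟩
            rw [List.mem_range] at hi
            rw [issafe_eq, Bool.or_eq_true_iff] at hsafe
            rcases hsafe with h | h
            · exact Or.inl ⟨i, hi, h⟩
            · exact Or.inr ⟨i, hi, h⟩
          · rintro (⟨i, hi, hsafe⟩ | ⟨i, hi, hsafe⟩)
            · exact ⟨i, List.mem_range.mpr hi, by rw [issafe_eq, Bool.or_eq_true_iff]; exact Or.inl hsafe⟩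
            · exact ⟨i, List.mem_range.mpr hi, by rw [issafe_eq, Bool.or_eq_true_iff]; exact Or.inr hsafe⟩
        cases hA : solveInner line (List.range line.length) <;>
          cases hB : (dampened line 1 || dampened line (-1)) <;> simp_all
      simp [h1, h2, hbool]
    · simp [hp, h1, h2]

-- ===== VERDICT (by name: the statement is the Claim_ definition above) =====
theorem solve_spec : Claim_equal_solve := by
  intro lines part _
  unfold Spec_solve solve solve_alt
  rw [step_eq part]
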